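-- pv_equiv track=rewrite | github.com/madalenaciu/MatchingGame | game.py | empty
-- ===== SOURCE A (Python) =====
-- def empty(d):
--     """
--     Dhmiourgei lista  me ton xarakthra 'X' analoga me ton bathmo dyskolias , h opoia anaparista thn kleisth trapoula
--     d--bathmos dyskolias
--
--     """
--     listx=[]
--     if d==1:
--         for i in range(16):
--             listx.append('X')
--     elif d==2:
--         for i in range(40):
--             listx.append('X')
--     else:
--         for i in range(52):
--             listx.append('X')
--     return nest(listx , d)
--
-- def nest(ls , d):
--     """
--     Epistrefei fwliasmenh lista
--     ls--dwsmenh lista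
--     d--bathmos dyskolias
--     """
--     if d==1:
--         l=4 #krataei ton arithmo twn stoixeiwn ana grammh
--     elif d==2:
--         l=10
--     else:
--         l=13
--     list4=[]
--     k=0 #deikths pou anaparista thn thesh twn  stoixeiwn thw listas ls
--     m=1 #deikths pou anaparista ton arithmo ths sthlhs(1-4) kai eisxwreite vw prvto stoixeio ths listas
--     list3=[str(x) for x in range(l+1)]#Kataskeuazei thn prvth grammh tou pinaka poy periexei thn arithmhsh
--     list4.append(list3)
--     for i in range(0 , len(ls) , l):
--         list3=[]
--         s=0
--         list3.append(str(m))
--         m=m+1 #afksanetai kata 1 mexri na ftasei ton arithmo twn sthlwn tou pinaka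
--         while s<l:
--             list3.append(ls[k])
--             s=s+1
--             k=k+1
--         list4.append(list3)
--     return list4 #fwliasmenh lista
-- ===== SOURCE B (Python) =====
-- def empty(d):
--     """Direct row construction: header row 0..l, then 4 rows of 'X's."""
--     l = 4 if d == 1 else 10 if d == 2 else 13
--     board = [[str(x) for x in range(l + 1)]]
--     for m in range(1, 5):
--         board.append([str(m)] + ['X'] * l)
--     return board
-- ===== Notes on version B (the rewrite author's own statement) =====
-- stated objective: simpler
-- what changed: B picks the row width from d and builds the five rows directly (header row then four rows of a label plus repeated 'X'), eliminating A's intermediate flat all-'X' list and its index-chunking nest() helper with its nested while loop.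
import Mathlib
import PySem

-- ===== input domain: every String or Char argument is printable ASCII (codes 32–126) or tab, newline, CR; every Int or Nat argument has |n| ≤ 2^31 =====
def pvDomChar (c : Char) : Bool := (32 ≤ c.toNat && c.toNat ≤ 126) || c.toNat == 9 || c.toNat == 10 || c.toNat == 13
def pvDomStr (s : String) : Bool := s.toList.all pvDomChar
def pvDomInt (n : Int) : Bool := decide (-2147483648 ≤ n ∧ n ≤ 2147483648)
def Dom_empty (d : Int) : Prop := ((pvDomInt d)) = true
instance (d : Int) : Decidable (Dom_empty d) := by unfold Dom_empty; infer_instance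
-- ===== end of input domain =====

-- B replaces A's build-flat-list-then-chunk-by-index decomposition with direct row construction (simpler).

-- ===== PORT A =====
-- inner 'while s<l' of nest: appends ls[k] to list3, bumping s and k.
-- ls[k] is ported as (pyGet? ls k).getD "" — in A's calls k is always in range (len ls = 4*l),
-- so the default is never taken.
-- the while loop runs exactly (l - s).toNat iterations; encoded structurally on that count
def nestWhileAux (ls : List String) : Nat → Int → List String → List String × Int
  | 0, k, list3 => (list3, k)
  | n + 1, k, list3 => nestWhileAux ls n (k + 1) (list3 ++ [(PySem.List.pyGet? ls k).getD ""])

def nestWhile (ls : List String) (k s l : Int) (list3 : List String) : List String × Int :=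
  nestWhileAux ls (l - s).toNat k list3

-- 'for i in range(0, len(ls), l)': fold over pyRange carrying (k, m, list4)
def nest (ls : List String) (d : Int) : List (List String) :=
  let l : Int := if d = 1 then 4 else if d = 2 then 10 else 13
  let list3 := (PySem.List.pyRange 0 (l + 1) 1).map PySem.Int.toStr
  let list4 := [list3]
  let st := (PySem.List.pyRange 0 (ls.length : Int) l).foldl
    (fun (st : Int × Int × List (List String)) _ =>
      let (k, m, list4) := st
      let list3 := [PySem.Int.toStr m]
      let (list3, k) := nestWhile ls k 0 l list3
      (k, m + 1, list4 ++ [list3]))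
    (0, 1, list4)
  st.2.2

def empty (d : Int) : List (List String) :=
  let listx :=
    if d = 1 then (PySem.List.pyRange 0 16 1).foldl (fun acc _ => acc ++ ["X"]) []
    else if d = 2 then (PySem.List.pyRange 0 40 1).foldl (fun acc _ => acc ++ ["X"]) []
    else (PySem.List.pyRange 0 52 1).foldl (fun acc _ => acc ++ ["X"]) []
  nest listx d

-- ===== PORT B =====
def empty_alt (d : Int) : List (List String) :=
  let l : Int := if d = 1 then 4 else if d = 2 then 10 else 13
  let board := [(PySem.List.pyRange 0 (l + 1) 1).map PySem.Int.toStr]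
  (PySem.List.pyRange 1 5 1).foldl
    (fun board m => board ++ [[PySem.Int.toStr m] ++ List.replicate l.toNat "X"]) board

-- ===== PRECONDITION & SPEC =====
def Spec_empty (d : Int) (out : List (List String)) : Prop := out = empty_alt d
instance (d : Int) (out : List (List String)) : Decidable (Spec_empty d out) := by unfold Spec_empty; infer_instance

-- ===== CLAIM (what is proved, stated in full; the proofs are below) =====
def Claim_equal_empty : Prop := ∀ (d : Int), Dom_empty d → Spec_empty d (empty d)

-- ===== LEMMAS AND PROOFS =====
-- On the default branch (d ≠ 1, d ≠ 2) both programs compute a fixed closed value.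
lemma empty_default (d : Int) (h1 : d ≠ 1) (h2 : d ≠ 2) : empty d = empty 3 := by
  simp [empty, nest, h1, h2]

lemma empty_alt_default (d : Int) (h1 : d ≠ 1) (h2 : d ≠ 2) : empty_alt d = empty_alt 3 := by
  simp [empty_alt, h1, h2]

-- ===== VERDICT (by name: the statement is the Claim_ definition above) =====
theorem empty_spec : Claim_equal_empty := by
  intro d _
  unfold Spec_empty
  by_cases h1 : d = 1
  · subst h1; decide
  · by_cases h2 : d = 2
    · subst h2; decide
    · rw [empty_default d h1 h2, empty_alt_default d h1 h2]; decide
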